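-- pv_equiv track=rewrite | github.com/arnejad/Gaze-Shift-Compare | modules/methods/IDT.py | enforce_min_duration
-- ===== SOURCE A (Python) =====
-- def enforce_min_duration(labels, min_duration):
--     labels = labels.copy()
--     i = 0
--     while i < len(labels):
--         if labels[i] == 0:
--             start = i
--             while i < len(labels) and labels[i] == 0:
--                 i += 1
--             duration = i - start
--             if duration < min_duration:
--                 labels[start:i] = [1] * duration  # convert to saccade
--         else:
--             i += 1
--     return labels
-- ===== SOURCE B (Python) =====
-- def _runs(labels):
--     # run-length encode via a right fold: scan reversed, merge into / start the
--     # active run (kept at the end of 'rev', i.e. the list is built back-to-front)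
--     rev = []
--     for x in reversed(labels):
--         if rev and rev[-1][0] == x:
--             rev[-1] = (x, rev[-1][1] + 1)
--         else:
--             rev.append((x, 1))
--     rev.reverse()
--     return rev
--
--
-- def enforce_min_duration(labels, min_duration):
--     out = []
--     for v, n in _runs(labels):
--         out.extend([1] * n if v == 0 and n < min_duration else [v] * n)
--     return out
-- ===== Notes on version B (the rewrite author's own statement) =====
-- stated objective: alternative
-- what changed: Replaces A's in-place index scan with slice assignment by a two-pass run-length encoding: encode maximal runs once, then emit [1]*n for short zero runs and the run unchanged otherwise.
import Mathlib
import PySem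

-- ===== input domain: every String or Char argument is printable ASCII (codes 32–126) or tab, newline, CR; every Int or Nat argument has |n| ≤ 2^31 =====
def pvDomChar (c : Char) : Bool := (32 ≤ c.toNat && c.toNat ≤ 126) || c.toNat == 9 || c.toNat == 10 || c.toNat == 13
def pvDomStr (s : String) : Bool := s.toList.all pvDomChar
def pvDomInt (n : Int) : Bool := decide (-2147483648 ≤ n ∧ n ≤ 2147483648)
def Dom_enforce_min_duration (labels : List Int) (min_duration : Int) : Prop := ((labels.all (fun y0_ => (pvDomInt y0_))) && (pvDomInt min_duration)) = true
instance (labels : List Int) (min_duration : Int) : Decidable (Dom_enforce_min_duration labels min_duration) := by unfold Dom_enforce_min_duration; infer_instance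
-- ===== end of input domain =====

-- B replaces A's in-place index scan with a run-length-encode-then-emit pass (alternative decomposition, same cost).


-- ===== PORT A =====
-- number of leading zeros (the inner 'while i < len(labels) and labels[i] == 0' scan)
def pvCountZeros : List Int → Nat
  | 0 :: xs => pvCountZeros xs + 1
  | _ => 0

theorem pvCountZeros_le (l : List Int) : pvCountZeros l ≤ l.length := by
  induction l with
  | nil => simp [pvCountZeros]
  | cons x xs ih =>
    by_cases h : x = 0
    · subst h
      have : pvCountZeros (0 :: xs) = pvCountZeros xs + 1 := rfl
      simp only [this, List.length_cons]
      omega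
    · have : pvCountZeros (x :: xs) = 0 := by simp [pvCountZeros, h]
      simp [this]

-- A's outer loop: at a zero, consume the whole zero run; rewrite it to ones when short
-- (leaving it is emitting the same zeros); otherwise advance one element.
def pvALoop (m : Int) : List Int → List Int
  | [] => []
  | x :: xs =>
    if h : x = 0 then
      let n := pvCountZeros (x :: xs)
      (if (n : Int) < m then List.replicate n 1 else List.replicate n 0) ++
        pvALoop m ((x :: xs).drop n)
    else
      x :: pvALoop m xs
termination_by l => l.length
decreasing_by
  · have h1 := pvCountZeros_le (x :: xs)
    have h2 : 1 ≤ pvCountZeros (x :: xs) := by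
      subst h; exact Nat.succ_le_succ (Nat.zero_le _)
    simp only [List.length_drop, List.length_cons]
    omega
  · simp

def enforce_min_duration (labels : List Int) (min_duration : Int) : List Int :=
  pvALoop min_duration labels

-- ===== PORT B =====
-- run-length encoding built by the right fold in Source B (_runs: scan reversed, merge/prepend at front)
def pvRuns : List Int → List (Int × Nat)
  | [] => []
  | x :: xs =>
    match pvRuns xs with
    | [] => [(x, 1)]
    | (v, n) :: rest => if v = x then (x, n + 1) :: rest else (x, 1) :: (v, n) :: rest

def enforce_min_duration_alt (labels : List Int) (min_duration : Int) : List Int :=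
  (pvRuns labels).flatMap fun p =>
    if p.1 = 0 ∧ (p.2 : Int) < min_duration then List.replicate p.2 1
    else List.replicate p.2 p.1

-- ===== PRECONDITION & SPEC =====
def Spec_enforce_min_duration (labels : List Int) (min_duration : Int) (out : List Int) : Prop := out = enforce_min_duration_alt labels min_duration
instance (labels : List Int) (min_duration : Int) (out : List Int) : Decidable (Spec_enforce_min_duration labels min_duration out) := by unfold Spec_enforce_min_duration; infer_instance

-- ===== CLAIM (what is proved, stated in full; the proofs are below) =====
def Claim_equal_enforce_min_duration : Prop := ∀ (labels : List Int) (min_duration : Int), Dom_enforce_min_duration labels min_duration → Spec_enforce_min_duration labels min_duration (enforce_min_duration labels min_duration)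

-- ===== LEMMAS AND PROOFS =====

-- the head of pvRuns (x :: xs) carries value x
theorem pvRuns_head (x : Int) (xs : List Int) :
    ∃ n rest, pvRuns (x :: xs) = (x, n) :: rest := by
  simp only [pvRuns]
  rcases h : pvRuns xs with _ | ⟨⟨v, n⟩, rest⟩
  · exact ⟨1, [], rfl⟩
  · by_cases hv : v = x
    · exact ⟨n + 1, rest, by simp [hv]⟩
    · exact ⟨1, (v, n) :: rest, by simp [hv]⟩

-- pvRuns of a list starting with 0 peels off the whole leading zero run
theorem pvRuns_zero (xs : List Int) :
    pvRuns (0 :: xs) =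
      (0, pvCountZeros (0 :: xs)) :: pvRuns ((0 :: xs).drop (pvCountZeros (0 :: xs))) := by
  induction xs with
  | nil => simp [pvRuns, pvCountZeros]
  | cons y ys ih =>
    by_cases hy : y = 0
    · subst hy
      have hn : pvCountZeros (0 :: 0 :: ys) = pvCountZeros (0 :: ys) + 1 := by
        simp [pvCountZeros]
      rw [hn]
      have hd : (0 :: 0 :: ys : List Int).drop (pvCountZeros (0 :: ys) + 1)
          = (0 :: ys : List Int).drop (pvCountZeros (0 :: ys)) := by simp
      rw [hd]
      conv_lhs => rw [pvRuns]
      rw [ih]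
      simp
    · have hn : pvCountZeros (0 :: y :: ys) = 1 := by
        simp [pvCountZeros, hy]
      rw [hn]
      obtain ⟨n, rest, hr⟩ := pvRuns_head y ys
      conv_lhs => rw [pvRuns]
      rw [hr]
      simp [hr, hy]

-- emitting a run of x ≠ 0 one element at a time
theorem alt_cons_ne (m x : Int) (xs : List Int) (hx : x ≠ 0) :
    enforce_min_duration_alt (x :: xs) m = x :: enforce_min_duration_alt xs m := by
  unfold enforce_min_duration_alt
  conv_lhs => rw [pvRuns]
  rcases h : pvRuns xs with _ | ⟨⟨v, n⟩, rest⟩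
  · simp [hx]
  · by_cases hv : v = x
    · subst hv
      simp [hx, List.replicate_succ]
    · simp [hv, hx]

theorem alt_cons_zero (m : Int) (xs : List Int) :
    enforce_min_duration_alt (0 :: xs) m =
      (if ((pvCountZeros (0 :: xs) : Int)) < m then
          List.replicate (pvCountZeros (0 :: xs)) 1
        else List.replicate (pvCountZeros (0 :: xs)) 0) ++
      enforce_min_duration_alt ((0 :: xs).drop (pvCountZeros (0 :: xs))) m := by
  unfold enforce_min_duration_alt
  rw [pvRuns_zero]
  by_cases h : ((pvCountZeros ((0 : Int) :: xs) : Int)) < m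
  · simp [h]
  · simp [h]

theorem aLoop_eq_alt (m : Int) :
    ∀ (k : Nat) (l : List Int), l.length ≤ k → pvALoop m l = enforce_min_duration_alt l m := by
  intro k
  induction k with
  | zero =>
    intro l hl
    have : l = [] := List.eq_nil_of_length_eq_zero (Nat.le_zero.mp hl)
    subst this
    simp [pvALoop, enforce_min_duration_alt, pvRuns]
  | succ k ih =>
    intro l hl
    match l with
    | [] => simp [pvALoop, enforce_min_duration_alt, pvRuns]
    | x :: xs =>
      by_cases hx : x = 0
      · subst hx
        rw [pvALoop, alt_cons_zero, dif_pos rfl]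
        simp only []
        have hn : 1 ≤ pvCountZeros ((0 : Int) :: xs) := Nat.succ_le_succ (Nat.zero_le _)
        congr 1
        exact ih _ (by simp at hl ⊢; omega)
      · rw [pvALoop, alt_cons_ne m x xs hx]
        simp only [dif_neg hx]
        congr 1
        exact ih xs (by simp at hl; omega)

-- ===== VERDICT (by name: the statement is the Claim_ definition above) =====
theorem enforce_min_duration_spec : Claim_equal_enforce_min_duration := by
  intro labels m _
  unfold Spec_enforce_min_duration enforce_min_duration
  exact aLoop_eq_alt m labels.length labels le_rfl
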